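-- pv_equiv track=rewrite | github.com/iamcjdizon/Current-Programming-Application | 9Matrices.py | matrices
-- ===== SOURCE A (Python) =====
-- def matrices(M):
-- 	n = len(M)-1
-- 	ctr = 0
-- 	sum = 0
-- 	product = 1
-- 	column = n
-- 	row = 0
-- 	while ctr<=n*2:
-- 		if ctr==0:
-- 			product = product * M[row][column]
--
-- 		elif ctr<=n:
-- 			row = ctr
-- 			column = n
-- 			while row>-1:
-- 				product = product * M[row][column]
-- 				if row>-1:
-- 					row-=1
-- 					column-=1
-- 				else:
-- 					break
--
-- 		elif ctr>n:
-- 			row = n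
-- 			column = n - (ctr-n)
-- 			while (row!=0 or column!=0):
-- 				product = product * M[row][column]
-- 				if column!=0:
-- 					row-=1
-- 					column-=1
-- 				else:
-- 					break
--
--
-- 		sum = sum + product
-- 		product = 1
-- 		ctr+=1
--
-- 	ctr2 = 0
-- 	sum2 = 0
-- 	product2 = 1
-- 	column2 = 0
-- 	row2 = 0
-- 	while ctr2<=n*2:
-- 		if ctr2==0:
-- 			product2 = product2 * M[row2][column2]
--
-- 		elif ctr2<=n:
-- 			row2 = ctr2
-- 			column2 = 0
-- 			while (row2!=-1):
-- 				product2 = product2 * M[row2][column2]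
-- 				if row2!=-1:
-- 					row2-=1
-- 					column2+=1
--
-- 		elif ctr2>n:
-- 			row2 = n
-- 			column2 = ctr2-n
-- 			while (row2!=0 or column2!=n):
-- 				product2 = product2 * M[row2][column2]
-- 				if column2!=n:
-- 					row2-=1
-- 					column2+=1
-- 				else:
-- 					break
--
-- 		sum2 = sum2 + product2
-- 		product2 = 1
-- 		ctr2+=1
-- 	return (sum-sum2)
-- ===== SOURCE B (Python) =====
-- def matrices(M):
-- 	n = len(M) - 1
-- 	diag = {}
-- 	adiag = {}
-- 	for i in range(n, -1, -1):
-- 		for j in range(n + 1):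
-- 			v = M[i][j]
-- 			diag[i - j] = diag.get(i - j, 1) * v
-- 			adiag[i + j] = adiag.get(i + j, 1) * v
-- 	return sum(diag.values()) - sum(adiag.values())
-- ===== Notes on version B (the rewrite author's own statement) =====
-- stated objective: simpler
-- what changed: A walks each of the 2n+1 diagonals and 2n+1 anti-diagonals with two outer while-loops of three branches each, plus break-laden inner while-loops tracking row/column state; B makes one row-major pass over the matrix, accumulating every diagonal product in a dict keyed by i-j and every anti-diagonal product in a dict keyed by i+j, then sums the dict values.
import Mathlib
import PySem

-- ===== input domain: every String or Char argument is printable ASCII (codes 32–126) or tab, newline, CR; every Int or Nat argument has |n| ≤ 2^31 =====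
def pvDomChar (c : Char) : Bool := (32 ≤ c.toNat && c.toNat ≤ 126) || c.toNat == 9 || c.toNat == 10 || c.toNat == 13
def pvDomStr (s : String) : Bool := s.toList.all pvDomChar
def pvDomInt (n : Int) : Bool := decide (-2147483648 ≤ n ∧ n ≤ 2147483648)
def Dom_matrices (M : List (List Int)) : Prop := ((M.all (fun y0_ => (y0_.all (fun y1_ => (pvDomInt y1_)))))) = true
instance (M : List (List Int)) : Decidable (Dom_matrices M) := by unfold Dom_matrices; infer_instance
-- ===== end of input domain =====

-- B replaces A's two 5-branch while-loop cascades by one pass over the matrix entries that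
-- accumulates every diagonal/anti-diagonal product in two dicts keyed by i-j and i+j (objective: simpler).

-- ===== PORT A =====
-- M[r][c] (total form; Pre_matrices keeps every access in range)
def mEnt (M : List (List Int)) (r c : Int) : Int :=
  PySem.List.pyGetD (PySem.List.pyGetD M r []) c 0

-- first loop, branch ctr<=n: 'while row>-1: product *= M[row][column]; if row>-1: row-=1; column-=1 else: break'
def aDiagUp (M : List (List Int)) : Nat → Int → Int → Int → Int
  | 0, _, _, product => product
  | fuel+1, row, col, product =>
    if row > -1 then
      let p := product * mEnt M row col
      if row > -1 then aDiagUp M fuel (row-1) (col-1) p else p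
    else product

-- first loop, branch ctr>n: 'while row!=0 or column!=0: product *= M[row][column]; if column!=0: row-=1; column-=1 else: break'
def aDiagDown (M : List (List Int)) : Nat → Int → Int → Int → Int
  | 0, _, _, product => product
  | fuel+1, row, col, product =>
    if row ≠ 0 ∨ col ≠ 0 then
      let p := product * mEnt M row col
      if col ≠ 0 then aDiagDown M fuel (row-1) (col-1) p else p
    else product

-- first outer loop 'while ctr<=n*2' (row/column are re-assigned by every branch except ctr==0,
-- where they still hold their initial values 0 and n; product is reset to 1 each iteration)
def aLoop1 (M : List (List Int)) (n : Int) : Nat → Int → Int → Int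
  | 0, _, sum => sum
  | fuel+1, ctr, sum =>
    if ctr ≤ n*2 then
      let product :=
        if ctr = 0 then 1 * mEnt M 0 n
        else if ctr ≤ n then aDiagUp M (M.length+1) ctr n 1
        else aDiagDown M (M.length+1) n (n - (ctr - n)) 1
      aLoop1 M n fuel (ctr+1) (sum + product)
    else sum

-- second loop, branch ctr2<=n: 'while row2!=-1: product2 *= M[row2][column2]; if row2!=-1: row2-=1; column2+=1'
def aAntiUp (M : List (List Int)) : Nat → Int → Int → Int → Int
  | 0, _, _, product => product
  | fuel+1, row, col, product =>
    if row ≠ -1 then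
      let p := product * mEnt M row col
      if row ≠ -1 then aAntiUp M fuel (row-1) (col+1) p else p
    else product

-- second loop, branch ctr2>n: 'while row2!=0 or column2!=n: product2 *= M[row2][column2]; if column2!=n: row2-=1; column2+=1 else: break'
def aAntiDown (M : List (List Int)) (n : Int) : Nat → Int → Int → Int → Int
  | 0, _, _, product => product
  | fuel+1, row, col, product =>
    if row ≠ 0 ∨ col ≠ n then
      let p := product * mEnt M row col
      if col ≠ n then aAntiDown M n fuel (row-1) (col+1) p else p
    else product

-- second outer loop 'while ctr2<=n*2' (row2/column2 start at 0 and 0)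
def aLoop2 (M : List (List Int)) (n : Int) : Nat → Int → Int → Int
  | 0, _, sum => sum
  | fuel+1, ctr, sum =>
    if ctr ≤ n*2 then
      let product :=
        if ctr = 0 then 1 * mEnt M 0 0
        else if ctr ≤ n then aAntiUp M (M.length+1) ctr 0 1
        else aAntiDown M n (M.length+1) n (ctr - n) 1
      aLoop2 M n fuel (ctr+1) (sum + product)
    else sum

def matrices (M : List (List Int)) : Int :=
  let n := PySem.List.len M - 1
  aLoop1 M n (2*M.length+1) 0 0 - aLoop2 M n (2*M.length+1) 0 0

-- ===== PORT B =====
def matrices_alt (M : List (List Int)) : Int :=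
  let n := PySem.List.len M - 1
  let dd := (PySem.List.pyRange n (-1) (-1)).foldl (fun dd i =>
      (PySem.List.pyRange 0 (n+1) 1).foldl (fun dd j =>
        let v := mEnt M i j
        (dd.1.insert (i-j) (dd.1.getD (i-j) 1 * v),
         dd.2.insert (i+j) (dd.2.getD (i+j) 1 * v))) dd)
    ((PySem.Dict.empty, PySem.Dict.empty) : PySem.Dict Int Int × PySem.Dict Int Int)
  (PySem.Dict.values dd.1).sum - (PySem.Dict.values dd.2).sum

-- ===== PRECONDITION & SPEC =====
-- Pre_ excludes exactly the inputs where Python A raises IndexError: some row shorter than len(M)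
def Pre_matrices (M : List (List Int)) : Prop := ∀ row ∈ M, M.length ≤ row.length
instance (M : List (List Int)) : Decidable (Pre_matrices M) := by unfold Pre_matrices; infer_instance
def pvWitness_matrices : List (List Int) := [[1, 2], [3, 4]]

def Spec_matrices (M : List (List Int)) (out : Int) : Prop := out = matrices_alt M
instance (M : List (List Int)) (out : Int) : Decidable (Spec_matrices M out) := by unfold Spec_matrices; infer_instance

-- ===== CLAIM (what is proved, stated in full; the proofs are below) =====
def Claim_equal_matrices : Prop := ∀ (M : List (List Int)), Dom_matrices M → Pre_matrices M → Spec_matrices M (matrices M)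

-- ===== LEMMAS AND PROOFS =====

-- canonical per-diagonal data: diagonal k = {(i,j) : i-j = k}, anti-diagonal q = {(i,j) : i+j = q};
-- rows listed from the bottom (as both programs traverse them)
def hiD (n k : Int) : Int := if k ≤ 0 then n + k else n
def cntD (n k : Int) : Nat := (n + 1 - (k.natAbs : Int)).toNat
def dRows (n k : Int) : List Int := (List.range (cntD n k)).map (fun t : Nat => hiD n k - (t:Int))
def dProd (M : List (List Int)) (n k : Int) : Int :=
  ((dRows n k).map (fun i => mEnt M i (i - k))).prod
def aProd (M : List (List Int)) (n q : Int) : Int :=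
  ((dRows n (q - n)).map (fun i => mEnt M i (q - i))).prod

lemma aDiagUp_neg (M : List (List Int)) (f : Nat) (col p : Int) :
    aDiagUp M f (-1) col p = p := by
  cases f <;> simp [aDiagUp]

lemma aDiagUp_eq (M : List (List Int)) :
    ∀ (fuel : Nat) (row col p : Int), 0 ≤ row → row < fuel →
    aDiagUp M fuel row col p
      = p * ((List.range (row.toNat+1)).map (fun t : Nat => mEnt M (row - (t:Int)) (col - (t:Int)))).prod := by
  intro fuel
  induction fuel with
  | zero => intro row col p h1 h2; exfalso; simp at h2; omega
  | succ f ih =>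
    intro row col p h1 h2
    by_cases h0 : row = 0
    · subst h0
      simp [aDiagUp, aDiagUp_neg]
    · simp only [aDiagUp]
      rw [if_pos (by omega : row > -1), if_pos (by omega : row > -1)]
      rw [ih (row-1) (col-1) _ (by omega) (by push_cast at h2 ⊢; omega)]
      have hm : List.map (fun t : Nat => mEnt M (row - 1 - (t:Int)) (col - 1 - (t:Int))) (List.range ((row-1).toNat + 1))
          = List.map ((fun t : Nat => mEnt M (row - (t:Int)) (col - (t:Int))) ∘ Nat.succ) (List.range ((row-1).toNat + 1)) := by
        apply List.map_congr_left; intro t _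
        simp only [Function.comp]; congr 1 <;> push_cast <;> ring
      rw [hm]
      conv_rhs => rw [show row.toNat + 1 = ((row-1).toNat + 1) + 1 by omega, List.range_succ_eq_map]
      rw [List.map_cons, List.map_map, List.prod_cons]
      simp only [Nat.cast_zero, sub_zero]
      ring

lemma aDiagDown_eq (M : List (List Int)) :
    ∀ (fuel : Nat) (row col p : Int), 0 ≤ col → col < row → col < fuel →
    aDiagDown M fuel row col p
      = p * ((List.range (col.toNat+1)).map (fun t : Nat => mEnt M (row - (t:Int)) (col - (t:Int)))).prod := by
  intro fuel
  induction fuel with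
  | zero => intro row col p h1 h2 h3; exfalso; simp at h3; omega
  | succ f ih =>
    intro row col p h1 h2 h3
    by_cases h0 : col = 0
    · subst h0
      simp only [aDiagDown]
      rw [if_pos (by omega : row ≠ 0 ∨ (0:Int) ≠ 0), if_neg (by omega : ¬ (0:Int) ≠ 0)]
      simp
    · simp only [aDiagDown]
      rw [if_pos (by omega : row ≠ 0 ∨ col ≠ 0), if_pos (by omega : col ≠ 0)]
      rw [ih (row-1) (col-1) _ (by omega) (by omega) (by push_cast at h3 ⊢; omega)]
      have hm : List.map (fun t : Nat => mEnt M (row - 1 - (t:Int)) (col - 1 - (t:Int))) (List.range ((col-1).toNat + 1))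
          = List.map ((fun t : Nat => mEnt M (row - (t:Int)) (col - (t:Int))) ∘ Nat.succ) (List.range ((col-1).toNat + 1)) := by
        apply List.map_congr_left; intro t _
        simp only [Function.comp]; congr 1 <;> push_cast <;> ring
      rw [hm]
      conv_rhs => rw [show col.toNat + 1 = ((col-1).toNat + 1) + 1 by omega, List.range_succ_eq_map]
      rw [List.map_cons, List.map_map, List.prod_cons]
      simp only [Nat.cast_zero, sub_zero]
      ring

lemma aAntiUp_neg (M : List (List Int)) (f : Nat) (col p : Int) :
    aAntiUp M f (-1) col p = p := by
  cases f <;> simp [aAntiUp]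

lemma aAntiUp_eq (M : List (List Int)) :
    ∀ (fuel : Nat) (row col p : Int), 0 ≤ row → row < fuel →
    aAntiUp M fuel row col p
      = p * ((List.range (row.toNat+1)).map (fun t : Nat => mEnt M (row - (t:Int)) (col + (t:Int)))).prod := by
  intro fuel
  induction fuel with
  | zero => intro row col p h1 h2; exfalso; simp at h2; omega
  | succ f ih =>
    intro row col p h1 h2
    by_cases h0 : row = 0
    · subst h0
      simp [aAntiUp, aAntiUp_neg]
    · simp only [aAntiUp]
      rw [if_pos (by omega : row ≠ -1), if_pos (by omega : row ≠ -1)]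
      rw [ih (row-1) (col+1) _ (by omega) (by push_cast at h2 ⊢; omega)]
      have hm : List.map (fun t : Nat => mEnt M (row - 1 - (t:Int)) (col + 1 + (t:Int))) (List.range ((row-1).toNat + 1))
          = List.map ((fun t : Nat => mEnt M (row - (t:Int)) (col + (t:Int))) ∘ Nat.succ) (List.range ((row-1).toNat + 1)) := by
        apply List.map_congr_left; intro t _
        simp only [Function.comp]; congr 1 <;> push_cast <;> ring
      rw [hm]
      conv_rhs => rw [show row.toNat + 1 = ((row-1).toNat + 1) + 1 by omega, List.range_succ_eq_map]
      rw [List.map_cons, List.map_map, List.prod_cons]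
      simp only [Nat.cast_zero, sub_zero, add_zero]
      ring

lemma aAntiDown_eq (M : List (List Int)) (n : Int) :
    ∀ (fuel : Nat) (row col p : Int), 0 ≤ n - col → n - col < row → n - col < fuel →
    aAntiDown M n fuel row col p
      = p * ((List.range ((n-col).toNat+1)).map (fun t : Nat => mEnt M (row - (t:Int)) (col + (t:Int)))).prod := by
  intro fuel
  induction fuel with
  | zero => intro row col p h1 h2 h3; exfalso; simp at h3; omega
  | succ f ih =>
    intro row col p h1 h2 h3
    by_cases h0 : col = n
    · subst h0
      simp only [aAntiDown]
      rw [if_pos (by omega : row ≠ 0 ∨ col ≠ col), if_neg (by omega : ¬ col ≠ col)]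
      simp
    · simp only [aAntiDown]
      rw [if_pos (Or.inr h0), if_pos h0]
      rw [ih (row-1) (col+1) _ (by omega) (by omega) (by push_cast at h3 ⊢; omega)]
      have hm : List.map (fun t : Nat => mEnt M (row - 1 - (t:Int)) (col + 1 + (t:Int))) (List.range ((n-(col+1)).toNat + 1))
          = List.map ((fun t : Nat => mEnt M (row - (t:Int)) (col + (t:Int))) ∘ Nat.succ) (List.range ((n-(col+1)).toNat + 1)) := by
        apply List.map_congr_left; intro t _
        simp only [Function.comp]; congr 1 <;> push_cast <;> ring
      rw [hm]
      conv_rhs => rw [show (n-col).toNat + 1 = ((n-(col+1)).toNat + 1) + 1 by omega, List.range_succ_eq_map]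
      rw [List.map_cons, List.map_map, List.prod_cons]
      simp only [Nat.cast_zero, sub_zero, add_zero]
      ring

lemma aLoop1_eq (M : List (List Int)) (n : Int) :
    ∀ (fuel : Nat) (ctr sum : Int), (n*2+1-ctr).toNat ≤ fuel →
    aLoop1 M n fuel ctr sum
      = sum + ((PySem.List.pyRange ctr (n*2+1) 1).map (fun c =>
          if c = 0 then 1 * mEnt M 0 n
          else if c ≤ n then aDiagUp M (M.length+1) c n 1
          else aDiagDown M (M.length+1) n (n - (c - n)) 1)).sum := by
  intro fuel
  induction fuel with
  | zero =>
    intro ctr sum h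
    rw [PySem.List.pyRange_one_eq_nil (by omega)]
    simp [aLoop1]
  | succ f ih =>
    intro ctr sum h
    by_cases hc : ctr ≤ n*2
    · simp only [aLoop1]
      rw [if_pos hc, ih (ctr+1) _ (by omega)]
      rw [PySem.List.pyRange_one_cons (by omega : ctr < n*2+1)]
      rw [List.map_cons, List.sum_cons]
      ring
    · simp only [aLoop1]
      rw [if_neg hc, PySem.List.pyRange_one_eq_nil (by omega)]
      simp

lemma aLoop2_eq (M : List (List Int)) (n : Int) :
    ∀ (fuel : Nat) (ctr sum : Int), (n*2+1-ctr).toNat ≤ fuel →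
    aLoop2 M n fuel ctr sum
      = sum + ((PySem.List.pyRange ctr (n*2+1) 1).map (fun c =>
          if c = 0 then 1 * mEnt M 0 0
          else if c ≤ n then aAntiUp M (M.length+1) c 0 1
          else aAntiDown M n (M.length+1) n (c - n) 1)).sum := by
  intro fuel
  induction fuel with
  | zero =>
    intro ctr sum h
    rw [PySem.List.pyRange_one_eq_nil (by omega)]
    simp [aLoop2]
  | succ f ih =>
    intro ctr sum h
    by_cases hc : ctr ≤ n*2
    · simp only [aLoop2]
      rw [if_pos hc, ih (ctr+1) _ (by omega)]
      rw [PySem.List.pyRange_one_cons (by omega : ctr < n*2+1)]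
      rw [List.map_cons, List.sum_cons]
      ring
    · simp only [aLoop2]
      rw [if_neg hc, PySem.List.pyRange_one_eq_nil (by omega)]
      simp

-- A's value as a sum of canonical per-diagonal products
lemma matrices_eq_canon (M : List (List Int)) :
    matrices M
      = ((PySem.List.pyRange 0 ((((M.length:Int)-1))*2+1) 1).map (fun c => dProd M ((M.length:Int)-1) (c - ((M.length:Int)-1)))).sum
      - ((PySem.List.pyRange 0 ((((M.length:Int)-1))*2+1) 1).map (fun c => aProd M ((M.length:Int)-1) c)).sum := by
  set n := (M.length:Int) - 1 with hn
  have hL : matrices M = aLoop1 M n (2*M.length+1) 0 0 - aLoop2 M n (2*M.length+1) 0 0 := by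
    simp [matrices, hn]
  rw [hL, aLoop1_eq M n _ 0 0 (by rw [hn]; omega), aLoop2_eq M n _ 0 0 (by rw [hn]; omega)]
  rw [zero_add, zero_add]
  congr 1
  · apply congrArg; apply List.map_congr_left
    intro c hc
    rw [PySem.List.mem_pyRange_one] at hc
    have hn0 : 0 ≤ n := by omega
    by_cases hc0 : c = 0
    · subst hc0
      have h1 : cntD n (0 - n) = 1 := by unfold cntD; omega
      have h2 : hiD n (0 - n) = 0 := by unfold hiD; split <;> omega
      rw [if_pos rfl, dProd, dRows, h1, h2]
      simp
    · by_cases hcn : c ≤ n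
      · rw [if_neg hc0, if_pos hcn]
        rw [aDiagUp_eq M (M.length+1) c n 1 (by omega) (by rw [hn] at *; push_cast; omega)]
        have h1 : cntD n (c - n) = c.toNat + 1 := by unfold cntD; omega
        have h2 : hiD n (c - n) = c := by unfold hiD; split <;> omega
        rw [one_mul, dProd, dRows, h1, h2, List.map_map]
        apply congrArg; apply List.map_congr_left
        intro t _
        simp only [Function.comp]
        congr 1
        omega
      · rw [if_neg hc0, if_neg hcn]
        rw [aDiagDown_eq M (M.length+1) n (n - (c - n)) 1 (by omega) (by omega)
          (by rw [hn] at *; push_cast; omega)]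
        have h1 : cntD n (c - n) = (n - (c - n)).toNat + 1 := by unfold cntD; omega
        have h2 : hiD n (c - n) = n := by unfold hiD; split <;> omega
        rw [one_mul, dProd, dRows, h1, h2, List.map_map]
        apply congrArg; apply List.map_congr_left
        intro t _
        simp only [Function.comp]
        congr 1
        omega
  · apply congrArg; apply List.map_congr_left
    intro c hc
    rw [PySem.List.mem_pyRange_one] at hc
    have hn0 : 0 ≤ n := by omega
    by_cases hc0 : c = 0
    · subst hc0
      have h1 : cntD n (0 - n) = 1 := by unfold cntD; omega
      have h2 : hiD n (0 - n) = 0 := by unfold hiD; split <;> omega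
      rw [if_pos rfl, aProd, dRows, h1, h2]
      simp
    · by_cases hcn : c ≤ n
      · rw [if_neg hc0, if_pos hcn]
        rw [aAntiUp_eq M (M.length+1) c 0 1 (by omega) (by rw [hn] at *; push_cast; omega)]
        have h1 : cntD n (c - n) = c.toNat + 1 := by unfold cntD; omega
        have h2 : hiD n (c - n) = c := by unfold hiD; split <;> omega
        rw [one_mul, aProd, dRows, h1, h2, List.map_map]
        apply congrArg; apply List.map_congr_left
        intro t _
        simp only [Function.comp]
        congr 1
        omega
      · rw [if_neg hc0, if_neg hcn]
        rw [aAntiDown_eq M n (M.length+1) n (c - n) 1 (by omega) (by omega)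
          (by rw [hn] at *; push_cast; omega)]
        have h1 : cntD n (c - n) = (n - (c - n)).toNat + 1 := by unfold cntD; omega
        have h2 : hiD n (c - n) = n := by unfold hiD; split <;> omega
        rw [one_mul, aProd, dRows, h1, h2, List.map_map]
        apply congrArg; apply List.map_congr_left
        intro t _
        simp only [Function.comp]
        congr 1
        omega

-- generic: value of a key after a product-accumulating dict fold
lemma getD_prod_fold (T : List (Int × Int)) :
    ∀ (d : PySem.Dict Int Int) (k : Int),
    (T.foldl (fun d p => d.insert p.1 (d.getD p.1 1 * p.2)) d).getD k 1
      = d.getD k 1 * ((T.filter (fun p => p.1 == k)).map (·.2)).prod := by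
  induction T with
  | nil => simp
  | cons p T ih =>
    intro d k
    simp only [List.foldl_cons, List.filter_cons, ih]
    by_cases h : p.1 = k
    · simp [h, mul_assoc]
    · simp [h, PySem.Dict.getD_insert, Ne.symm h]

-- generic: filtering a Nodup list for one element
lemma filter_eq_singleton {α : Type} [DecidableEq α] (xs : List α) (c : α) (h : xs.Nodup) :
    xs.filter (fun x => x == c) = if c ∈ xs then [c] else [] := by
  induction xs with
  | nil => rfl
  | cons x xs ih =>
    simp only [List.nodup_cons] at h
    by_cases hx : x = c
    · subst hx
      have hnil : List.filter (fun y => y == x) xs = [] := by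
        rw [List.filter_eq_nil_iff]
        intro y hy hyx
        simp only [beq_iff_eq] at hyx
        exact h.1 (hyx ▸ hy)
      simp [hnil]
    · simp [hx, ih h.2, Ne.symm hx]

-- generic: a nested fold building an independent pair splits into two folds
lemma pairfold {A B C D : Type} (l : List A) (m : A → List B)
    (f : C → A → B → C) (g : D → A → B → D) :
    ∀ (a : C) (b : D),
    l.foldl (fun ab i => (m i).foldl (fun ab j => (f ab.1 i j, g ab.2 i j)) ab) (a, b)
      = (l.foldl (fun x i => (m i).foldl (fun x j => f x i j) x) a,
         l.foldl (fun y i => (m i).foldl (fun y j => g y i j) y) b) := by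
  induction l with
  | nil => intro a b; rfl
  | cons i l ih =>
    intro a b
    simp only [List.foldl_cons]
    rw [PySem.List.foldl_prod_mk (f := fun x j => f x i j) (g := fun y j => g y i j)]
    exact ih _ _

-- the traversal of B's nested loops, flattened to (key, entry) pairs
def travT (M : List (List Int)) (n : Int) (key : Int → Int → Int) : List (Int × Int) :=
  (PySem.List.pyRange n (-1) (-1)).flatMap
    (fun i => (PySem.List.pyRange 0 (n+1) 1).map (fun j => (key i j, mEnt M i j)))

lemma fold_nested_eq_travT (M : List (List Int)) (n : Int) (key : Int → Int → Int) :
    (PySem.List.pyRange n (-1) (-1)).foldl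
      (fun d i => (PySem.List.pyRange 0 (n+1) 1).foldl
        (fun d j => d.insert (key i j) (d.getD (key i j) 1 * mEnt M i j)) d) PySem.Dict.empty
    = (travT M n key).foldl (fun d p => d.insert p.1 (d.getD p.1 1 * p.2)) PySem.Dict.empty := by
  rw [travT, List.foldl_flatMap]
  simp only [List.foldl_map]

-- the sum of the dict's values after the product-accumulating fold
lemma sum_values_fold (T : List (Int × Int)) :
    (PySem.Dict.values (T.foldl (fun d p => d.insert p.1 (d.getD p.1 1 * p.2)) PySem.Dict.empty)).sum
      = ((PySem.Set.ofList (T.map Prod.fst)).map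
          (fun k => ((T.filter (fun p => p.1 == k)).map (·.2)).prod)).sum := by
  have hnd : (T.foldl (fun d p => d.insert p.1 (d.getD p.1 1 * p.2)) PySem.Dict.empty).keys.Nodup :=
    PySem.Dict.nodup_keys_foldl_insert_key T Prod.fst _ _ PySem.Dict.nodup_keys_empty
  rw [PySem.Dict.values_eq_map_keys _ hnd 1]
  rw [PySem.Dict.keys_foldl_insert_key]
  rw [PySem.Dict.keys_empty, PySem.Set.update_nil_left]
  apply congrArg
  apply List.map_congr_left
  intro k _
  rw [getD_prod_fold, PySem.Dict.getD_empty, one_mul]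

-- flatMap of conditional singletons, Prop-condition form
lemma flatMap_ite_singleton {A B : Type} (l : List A) (p : A → Prop) [DecidablePred p] (f : A → B) :
    (l.flatMap (fun x => if p x then [f x] else [])) = (l.filter (fun x => decide (p x))).map f := by
  induction l with
  | nil => rfl
  | cons x l ih => by_cases h : p x <;> simp [h, ih]

lemma mem_dRows (n k z : Int) :
    z ∈ dRows n k ↔ (k ≤ z ∧ 0 ≤ z ∧ z ≤ n ∧ z ≤ n + k) := by
  unfold dRows cntD hiD
  by_cases hk : k ≤ 0 <;>
    simp only [hk, if_true, if_false, List.mem_map, List.mem_range] <;>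
    constructor
  · rintro ⟨t, ht, rfl⟩; omega
  · intro h; exact ⟨(n + k - z).toNat, by omega, by omega⟩
  · rintro ⟨t, ht, rfl⟩; omega
  · intro h; exact ⟨(n - z).toNat, by omega, by omega⟩

lemma nodup_dRows (n k : Int) : (dRows n k).Nodup := by
  unfold dRows
  exact (List.nodup_range).map (fun a b h => by omega)

lemma nodup_rows (n : Int) : (PySem.List.pyRange n (-1) (-1)).Nodup := by
  rw [PySem.List.pyRange_neg_one_eq_reverse]
  exact List.nodup_reverse.mpr (PySem.List.nodup_pyRange_one _ _)

-- per-key product of the traversal = canonical diagonal product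
lemma prodKey_diag (M : List (List Int)) (n k : Int) :
    (((travT M n (fun i j => i - j)).filter (fun p => p.1 == k)).map (·.2)).prod
      = dProd M n k := by
  rw [travT, List.filter_flatMap]
  have hinner : ∀ i : Int,
      (((PySem.List.pyRange 0 (n+1) 1).map (fun j => ((fun i j => i - j) i j, mEnt M i j))).filter
        (fun p => p.1 == k))
        = if (0 ≤ i - k ∧ i - k < n+1) then [(k, mEnt M i (i-k))] else [] := by
    intro i
    rw [List.filter_map]
    have hfc : ((PySem.List.pyRange 0 (n+1) 1).filter
          ((fun p : Int × Int => p.1 == k) ∘ (fun j => ((fun i j => i - j) i j, mEnt M i j))))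
        = (PySem.List.pyRange 0 (n+1) 1).filter (fun j => j == i - k) := by
      apply List.filter_congr
      intro j _
      show (i - j == k) = (j == i - k)
      by_cases h : j = i - k
      · subst h; simp
      · have h2 : ¬ i - j = k := by omega
        simp [h, h2]
    rw [hfc, filter_eq_singleton _ _ (PySem.List.nodup_pyRange_one 0 (n+1))]
    simp only [PySem.List.mem_pyRange_one]
    by_cases hc : 0 ≤ i - k ∧ i - k < n + 1
    · rw [if_pos hc, if_pos hc]
      simp
    · rw [if_neg hc, if_neg hc]; rfl
  simp only [hinner]
  rw [List.map_flatMap]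
  have hmap : ∀ i : Int,
      ((if (0 ≤ i - k ∧ i - k < n+1) then [(k, mEnt M i (i-k))] else []).map (·.2))
        = if (0 ≤ i - k ∧ i - k < n+1) then [mEnt M i (i-k)] else [] := by
    intro i; split <;> rfl
  simp only [hmap]
  rw [flatMap_ite_singleton _ (fun i => 0 ≤ i - k ∧ i - k < n+1) (fun i => mEnt M i (i-k))]
  have hperm : ((PySem.List.pyRange n (-1) (-1)).filter
        (fun i => decide (0 ≤ i - k ∧ i - k < n+1))).Perm (dRows n k) := by
    rw [List.perm_ext_iff_of_nodup (List.Nodup.filter _ (nodup_rows n)) (nodup_dRows n k)]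
    intro z
    rw [List.mem_filter, mem_dRows, PySem.List.mem_pyRange_neg_one]
    simp only [decide_eq_true_eq]
    omega
  rw [dProd]
  exact (hperm.map _).prod_eq

-- per-key product of the traversal = canonical anti-diagonal product
lemma prodKey_anti (M : List (List Int)) (n k : Int) :
    (((travT M n (fun i j => i + j)).filter (fun p => p.1 == k)).map (·.2)).prod
      = aProd M n k := by
  rw [travT, List.filter_flatMap]
  have hinner : ∀ i : Int,
      (((PySem.List.pyRange 0 (n+1) 1).map (fun j => ((fun i j => i + j) i j, mEnt M i j))).filter
        (fun p => p.1 == k))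
        = if (0 ≤ k - i ∧ k - i < n+1) then [(k, mEnt M i (k-i))] else [] := by
    intro i
    rw [List.filter_map]
    have hfc : ((PySem.List.pyRange 0 (n+1) 1).filter
          ((fun p : Int × Int => p.1 == k) ∘ (fun j => ((fun i j => i + j) i j, mEnt M i j))))
        = (PySem.List.pyRange 0 (n+1) 1).filter (fun j => j == k - i) := by
      apply List.filter_congr
      intro j _
      show (i + j == k) = (j == k - i)
      by_cases h : j = k - i
      · subst h; simp
      · have h2 : ¬ i + j = k := by omega
        simp [h, h2]
    rw [hfc, filter_eq_singleton _ _ (PySem.List.nodup_pyRange_one 0 (n+1))]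
    simp only [PySem.List.mem_pyRange_one]
    by_cases hc : 0 ≤ k - i ∧ k - i < n + 1
    · rw [if_pos hc, if_pos hc]
      simp
    · rw [if_neg hc, if_neg hc]; rfl
  simp only [hinner]
  rw [List.map_flatMap]
  have hmap : ∀ i : Int,
      ((if (0 ≤ k - i ∧ k - i < n+1) then [(k, mEnt M i (k-i))] else []).map (·.2))
        = if (0 ≤ k - i ∧ k - i < n+1) then [mEnt M i (k-i)] else [] := by
    intro i; split <;> rfl
  simp only [hmap]
  rw [flatMap_ite_singleton _ (fun i => 0 ≤ k - i ∧ k - i < n+1) (fun i => mEnt M i (k-i))]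
  have hperm : ((PySem.List.pyRange n (-1) (-1)).filter
        (fun i => decide (0 ≤ k - i ∧ k - i < n+1))).Perm (dRows n (k - n)) := by
    rw [List.perm_ext_iff_of_nodup (List.Nodup.filter _ (nodup_rows n)) (nodup_dRows n (k - n))]
    intro z
    rw [List.mem_filter, mem_dRows, PySem.List.mem_pyRange_neg_one]
    simp only [decide_eq_true_eq]
    omega
  rw [aProd]
  exact (hperm.map _).prod_eq

-- the keys B collects are a permutation of A's diagonal indices
lemma keys_diag_perm (M : List (List Int)) (n : Int) :
    (PySem.Set.ofList ((travT M n (fun i j => i - j)).map Prod.fst)).Perm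
      ((PySem.List.pyRange 0 (n*2+1) 1).map (fun c => c - n)) := by
  apply (List.perm_ext_iff_of_nodup (PySem.Set.nodup_ofList _)
    ((PySem.List.nodup_pyRange_one _ _).map (fun a b h => by omega))).mpr
  intro k
  rw [PySem.Set.mem_ofList]
  simp only [travT, List.mem_map, List.mem_flatMap, PySem.List.mem_pyRange_one,
    PySem.List.mem_pyRange_neg_one]
  constructor
  · rintro ⟨p, ⟨i, hi, j, hj, rfl⟩, rfl⟩
    exact ⟨i - j + n, by omega, by ring⟩
  · rintro ⟨c, hc, rfl⟩
    by_cases h : 0 ≤ c - n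
    · exact ⟨(c - n - 0, mEnt M (c - n) 0), ⟨c - n, by omega, 0, by omega, rfl⟩, by omega⟩
    · exact ⟨(0 - (n - c), mEnt M 0 (n - c)), ⟨0, by omega, n - c, by omega, rfl⟩, by omega⟩

lemma keys_anti_perm (M : List (List Int)) (n : Int) :
    (PySem.Set.ofList ((travT M n (fun i j => i + j)).map Prod.fst)).Perm
      (PySem.List.pyRange 0 (n*2+1) 1) := by
  apply (List.perm_ext_iff_of_nodup (PySem.Set.nodup_ofList _)
    (PySem.List.nodup_pyRange_one _ _)).mpr
  intro k
  rw [PySem.Set.mem_ofList]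
  simp only [travT, List.mem_map, List.mem_flatMap, PySem.List.mem_pyRange_one,
    PySem.List.mem_pyRange_neg_one]
  constructor
  · rintro ⟨p, ⟨i, hi, j, hj, rfl⟩, rfl⟩
    omega
  · intro hk
    by_cases h : k ≤ n
    · exact ⟨(k + 0, mEnt M k 0), ⟨k, by omega, 0, by omega, rfl⟩, by omega⟩
    · exact ⟨(n + (k - n), mEnt M n (k - n)), ⟨n, by omega, k - n, by omega, rfl⟩, by omega⟩

-- B's value as the same canonical sums
lemma matrices_alt_eq_canon (M : List (List Int)) :
    matrices_alt M
      = ((PySem.List.pyRange 0 ((((M.length:Int)-1))*2+1) 1).map (fun c => dProd M ((M.length:Int)-1) (c - ((M.length:Int)-1)))).sum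
      - ((PySem.List.pyRange 0 ((((M.length:Int)-1))*2+1) 1).map (fun c => aProd M ((M.length:Int)-1) c)).sum := by
  set n := (M.length:Int) - 1 with hn
  have hd := fold_nested_eq_travT M n (fun i j => i - j)
  have ha := fold_nested_eq_travT M n (fun i j => i + j)
  beta_reduce at hd ha
  have h0 : matrices_alt M
      = (PySem.Dict.values ((travT M n (fun i j => i - j)).foldl
            (fun d p => d.insert p.1 (d.getD p.1 1 * p.2)) PySem.Dict.empty)).sum
      - (PySem.Dict.values ((travT M n (fun i j => i + j)).foldl
            (fun d p => d.insert p.1 (d.getD p.1 1 * p.2)) PySem.Dict.empty)).sum := by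
    rw [matrices_alt]
    simp only [PySem.List.len_eq, ← hn]
    rw [pairfold (PySem.List.pyRange n (-1) (-1))
        (fun _ => PySem.List.pyRange 0 (n+1) 1)
        (fun d i j => d.insert (i-j) (d.getD (i-j) 1 * mEnt M i j))
        (fun d i j => d.insert (i+j) (d.getD (i+j) 1 * mEnt M i j))
        PySem.Dict.empty PySem.Dict.empty]
    rw [hd, ha]
  rw [h0, sum_values_fold, sum_values_fold]
  congr 1
  · have h1 : (PySem.Set.ofList ((travT M n (fun i j => i - j)).map Prod.fst)).map
        (fun k => (((travT M n (fun i j => i - j)).filter (fun p => p.1 == k)).map (·.2)).prod)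
        = (PySem.Set.ofList ((travT M n (fun i j => i - j)).map Prod.fst)).map (dProd M n) :=
      List.map_congr_left (fun k _ => prodKey_diag M n k)
    rw [h1, ((keys_diag_perm M n).map (dProd M n)).sum_eq, List.map_map]
    rfl
  · have h2 : (PySem.Set.ofList ((travT M n (fun i j => i + j)).map Prod.fst)).map
        (fun k => (((travT M n (fun i j => i + j)).filter (fun p => p.1 == k)).map (·.2)).prod)
        = (PySem.Set.ofList ((travT M n (fun i j => i + j)).map Prod.fst)).map (aProd M n) :=
      List.map_congr_left (fun k _ => prodKey_anti M n k)
    rw [h2, ((keys_anti_perm M n).map (aProd M n)).sum_eq]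

-- ===== VERDICT (by name: the statement is the Claim_ definition above) =====
theorem matrices_spec : Claim_equal_matrices := by
  intro M _ _
  unfold Spec_matrices
  rw [matrices_eq_canon, matrices_alt_eq_canon]
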